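-- pv_equiv track=rewrite | github.com/cirosantilli/project-euler-solutions | solvers/714.py | smallest_multiple_01
-- ===== SOURCE A (Python) =====
-- from collections import deque
--
-- def smallest_multiple_01(k: int) -> str:
--     """Smallest positive multiple of k using only digits {0,1}, leading digit 1."""
--     if k == 1:
--         return "1"
--
--     prev = [-1] * k
--     prev_digit = [-1] * k
--
--     start = 1 % k
--     q = deque([start])
--     prev[start] = -2
--     prev_digit[start] = 1
--
--     while q:
--         r = q.popleft()
--         if r == 0:
--             break
--
--         r10 = (r * 10) % k
--
--         nr = r10
--         if prev[nr] == -1: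
--             prev[nr] = r
--             prev_digit[nr] = 0
--             q.append(nr)
--
--         nr = (r10 + 1) % k
--         if prev[nr] == -1:
--             prev[nr] = r
--             prev_digit[nr] = 1
--             q.append(nr)
--
--     # reconstruct
--     r = 0
--     out = []
--     while True:
--         out.append(str(prev_digit[r]))
--         pr = prev[r]
--         if pr == -2:
--             break
--         r = pr
--     out.reverse()
--     return "".join(out)
-- ===== SOURCE B (Python) =====
-- from collections import deque
--
-- def smallest_multiple_01(k: int) -> str:
--     """Smallest positive multiple of k using only digits {0,1}, leading digit 1."""
--     if k == 1:
--         return "1"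
--     start = 1 % k
--     q = deque([(start, "1")])
--     visited = {start}
--     while q:
--         r, s = q.popleft()
--         if r == 0:
--             return s
--         r10 = (r * 10) % k
--         nr = r10
--         if nr not in visited:
--             visited.add(nr)
--             q.append((nr, s + "0"))
--         nr = (r10 + 1) % k
--         if nr not in visited:
--             visited.add(nr)
--             q.append((nr, s + "1"))
-- ===== Notes on version B (the rewrite author's own statement) =====
-- stated objective: simpler
-- what changed: B carries the answer string in the BFS queue as (residue, string) pairs and returns it directly when residue 0 is dequeued, eliminating A's prev/prev_digit parent arrays and the whole backward-reconstruction/reverse phase; Pre_ admits exactly the positive moduli, where A returns (elsewhere A raises ZeroDivisionError or IndexError).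
-- outside the precondition, e.g. on smallest_multiple_01(0): A raises ZeroDivisionError, B raises ZeroDivisionError
import Mathlib
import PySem

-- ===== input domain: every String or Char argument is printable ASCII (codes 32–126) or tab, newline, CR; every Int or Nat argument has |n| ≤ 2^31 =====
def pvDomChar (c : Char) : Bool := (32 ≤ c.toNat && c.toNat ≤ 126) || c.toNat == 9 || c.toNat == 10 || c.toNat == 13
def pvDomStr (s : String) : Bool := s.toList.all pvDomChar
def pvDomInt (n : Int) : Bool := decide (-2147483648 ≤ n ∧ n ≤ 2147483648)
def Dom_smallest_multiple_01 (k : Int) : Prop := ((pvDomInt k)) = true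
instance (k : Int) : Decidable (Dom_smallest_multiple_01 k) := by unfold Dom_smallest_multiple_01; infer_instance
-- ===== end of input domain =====

-- B replaces A's parent-array BFS + backward reconstruction by a BFS whose queue carries
-- (residue, answer-string) pairs, returning the string directly when residue 0 is dequeued
-- (objective: simpler; same BFS order, so identical output).

-- ===== PORT A =====
-- A's `while q` BFS loop over state (prev, prev_digit, queue).  The fuel argument is a pure
-- totality guard (in Python the loop always dequeues residue 0 within k iterations, since every
-- residue is enqueued at most once); both ports use the same fuel and return "" on exhaustion
-- or on an empty queue, branches a real run never reaches.  All list indices are residues in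
-- [0, k) under Pre_, so the total forms pyGetD/pySetD are exact there.
def pvReconA (prev pd : List Int) : Nat → Int → List String → List String
  | 0, _, out => out
  | f+1, r, out =>
    let out := out ++ [PySem.Int.toStr (PySem.List.pyGetD pd r (-1))]
    let pr := PySem.List.pyGetD prev r (-1)
    if pr == -2 then out else pvReconA prev pd f pr out

def pvBfsA (k : Int) : Nat → List Int → List Int → List Int → String
  | 0, _, _, _ => ""
  | f+1, prev, pd, q =>
    match q with
    | [] => ""
    | r :: q =>
      if r == 0 then
        -- A's reconstruction phase: walk prev back to the start marker -2, reverse, join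
        PySem.Str.join "" (pvReconA prev pd (k.toNat + 1) 0 []).reverse
      else
        let r10 := PySem.Int.mod (r * 10) k
        let st1 :=
          if PySem.List.pyGetD prev r10 (-1) == -1 then
            (PySem.List.pySetD prev r10 r, PySem.List.pySetD pd r10 0, q ++ [r10])
          else (prev, pd, q)
        let nr2 := PySem.Int.mod (r10 + 1) k
        let st2 :=
          if PySem.List.pyGetD st1.1 nr2 (-1) == -1 then
            (PySem.List.pySetD st1.1 nr2 r, PySem.List.pySetD st1.2.1 nr2 1, st1.2.2 ++ [nr2])
          else st1
        pvBfsA k f st2.1 st2.2.1 st2.2.2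

def smallest_multiple_01 (k : Int) : String :=
  if k == 1 then "1"
  else
    let start := PySem.Int.mod 1 k
    let prev := PySem.List.pySetD (List.replicate k.toNat (-1 : Int)) start (-2)
    let pd := PySem.List.pySetD (List.replicate k.toNat (-1 : Int)) start 1
    pvBfsA k (k.toNat + 1) prev pd [start]

-- ===== PORT B =====
def pvBfsB (k : Int) : Nat → PySem.Set Int → List (Int × String) → String
  | 0, _, _ => ""
  | f+1, visited, q =>
    match q with
    | [] => ""
    | (r, s) :: q =>
      if r == 0 then s
      else
        let r10 := PySem.Int.mod (r * 10) k
        let st1 :=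
          if PySem.Set.contains visited r10 then (visited, q)
          else (PySem.Set.add visited r10, q ++ [(r10, s ++ "0")])
        let nr2 := PySem.Int.mod (r10 + 1) k
        let st2 :=
          if PySem.Set.contains st1.1 nr2 then st1
          else (PySem.Set.add st1.1 nr2, st1.2 ++ [(nr2, s ++ "1")])
        pvBfsB k f st2.1 st2.2

def smallest_multiple_01_alt (k : Int) : String :=
  if k == 1 then "1"
  else
    let start := PySem.Int.mod 1 k
    pvBfsB k (k.toNat + 1) (PySem.Set.ofList [start]) [(start, "1")]

-- ===== PRECONDITION & SPEC =====
-- Pre_ is exactly where A returns: on a zero modulus Python raises ZeroDivisionError,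
-- and on a negative modulus it raises IndexError (prev is empty, start negative).
def Pre_smallest_multiple_01 (k : Int) : Prop := 1 ≤ k
instance (k : Int) : Decidable (Pre_smallest_multiple_01 k) := by unfold Pre_smallest_multiple_01; infer_instance
def pvWitness_smallest_multiple_01 : Int := (7)

def Spec_smallest_multiple_01 (k : Int) (out : String) : Prop := out = smallest_multiple_01_alt k
instance (k : Int) (out : String) : Decidable (Spec_smallest_multiple_01 k out) := by unfold Spec_smallest_multiple_01; infer_instance

-- ===== CLAIM (what is proved, stated in full; the proofs are below) =====
def Claim_equal_smallest_multiple_01 : Prop := ∀ (k : Int), Dom_smallest_multiple_01 k → Pre_smallest_multiple_01 k → Spec_smallest_multiple_01 k (smallest_multiple_01 k)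

-- ===== LEMMAS AND PROOFS =====

-- Proof-side mirror of A's reconstruction walk: the chain of digit strings read back from
-- residue r to the start marker -2; `none` if the fuel runs out, an index leaves
-- [0, len prev) or an unvisited entry (-1) is hit.
def pvChain (prev pd : List Int) : Nat → Int → Option (List String)
  | 0, _ => none
  | f+1, r =>
    if 0 ≤ r ∧ r < (prev.length : Int) then
      if PySem.List.pyGetD prev r (-1) = -2 then
        some [PySem.Int.toStr (PySem.List.pyGetD pd r (-1))]
      else if PySem.List.pyGetD prev r (-1) = -1 then none
      else (pvChain prev pd f (PySem.List.pyGetD prev r (-1))).map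
        (fun l => PySem.Int.toStr (PySem.List.pyGetD pd r (-1)) :: l)
    else none

-- number of visited residues = non-(-1) entries of prev; bounds every chain's length
def pvCnt (prev : List Int) : Nat := prev.countP (fun x => x != -1)

-- (r, s) is a coherent queue entry: s is the digit string A would reconstruct for r
def pvRel (prev pd : List Int) (r : Int) (s : String) : Prop :=
  ∃ l, pvChain prev pd (pvCnt prev) r = some l ∧ s = PySem.Str.join "" l.reverse

-- the bisimulation invariant between A's BFS state and B's BFS state
def pvInv (k : Int) (prev pd : List Int) (visited : PySem.Set Int)
    (qA : List Int) (qB : List (Int × String)) : Prop :=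
  prev.length = k.toNat ∧ pd.length = k.toNat ∧
  qA = qB.map Prod.fst ∧
  (∀ p ∈ qB, 0 ≤ p.1 ∧ p.1 < k ∧ pvRel prev pd p.1 p.2) ∧
  (∀ r : Int, 0 ≤ r → r < k →
    (PySem.Set.contains visited r = true ↔ PySem.List.pyGetD prev r (-1) ≠ -1))

theorem pvGetSet_self (xs : List Int) (i : Int) (v d : Int) (h0 : 0 ≤ i)
    (h1 : i < (xs.length : Int)) :
    PySem.List.pyGetD (PySem.List.pySetD xs i v) i d = v := by
  rw [PySem.List.pySetD_of_nonneg xs v h0, PySem.List.pyGetD_of_nonneg _ d h0]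
  rw [List.getD_eq_getElem?_getD, List.getElem?_set_self]
  · simp
  · omega

theorem pvGetSet_ne (xs : List Int) (i j : Int) (v d : Int) (h0 : 0 ≤ i) (hj : 0 ≤ j)
    (hne : j ≠ i) :
    PySem.List.pyGetD (PySem.List.pySetD xs i v) j d = PySem.List.pyGetD xs j d := by
  rw [PySem.List.pySetD_of_nonneg xs v h0, PySem.List.pyGetD_of_nonneg _ d hj,
    PySem.List.pyGetD_of_nonneg _ d hj]
  rw [List.getD_eq_getElem?_getD, List.getElem?_set_ne, ← List.getD_eq_getElem?_getD]
  omega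

theorem pvJoinNil (ls : List (List Char)) : PySem.Chars.join [] ls = ls.flatten := by
  simp only [PySem.Chars.join, List.intercalate]
  induction ls with
  | nil => simp
  | cons a t ih => cases t <;> simp_all [List.intersperse]

theorem pvJoinSnoc (l : List String) (x : String) :
    PySem.Str.join "" (l ++ [x]) = PySem.Str.join "" l ++ x := by
  apply String.toList_injective
  rw [String.toList_append, PySem.Str.toList_join, PySem.Str.toList_join]
  simp [pvJoinNil]

theorem pvChain_mono (prev pd : List Int) (f : Nat) (r : Int) (l : List String)
    (h : pvChain prev pd f r = some l) : pvChain prev pd (f+1) r = some l := by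
  induction f generalizing r l with
  | zero => simp [pvChain] at h
  | succ g ih =>
    rw [pvChain] at h ⊢
    split_ifs at h ⊢
    all_goals try exact h
    rw [Option.map_eq_some_iff] at h ⊢
    obtain ⟨l', hl', rfl⟩ := h
    exact ⟨l', ih _ _ hl', rfl⟩

theorem pvChain_le (prev pd : List Int) {f g : Nat} (hfg : f ≤ g) (r : Int) (l : List String)
    (h : pvChain prev pd f r = some l) : pvChain prev pd g r = some l := by
  induction g with
  | zero =>
    have hf : f = 0 := by omega
    subst hf; simp [pvChain] at h
  | succ g ih =>
    rcases Nat.lt_or_ge f (g+1) with hlt | hge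
    · exact pvChain_mono _ _ _ _ _ (ih (by omega))
    · have : f = g + 1 := by omega
      subst this; exact h

theorem pvRecon_of_chain (prev pd : List Int) (f : Nat) (r : Int) (l : List String)
    (h : pvChain prev pd f r = some l) : ∀ acc, pvReconA prev pd f r acc = acc ++ l := by
  induction f generalizing r l with
  | zero => simp [pvChain] at h
  | succ g ih =>
    intro acc
    rw [pvChain] at h
    rw [pvReconA]
    split_ifs at h with h1 h2 h3
    · simp only [beq_iff_eq, h2, if_pos]
      simp only [Option.some.injEq] at h
      simp [← h]
    · simp only [beq_iff_eq]
      rw [if_neg h2]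
      rw [Option.map_eq_some_iff] at h
      obtain ⟨l', hl', rfl⟩ := h
      rw [ih _ _ hl']
      simp

theorem pvChain_set (prev pd : List Int) (nr v w : Int)
    (hnr : PySem.List.pyGetD prev nr (-1) = -1) (h0 : 0 ≤ nr) (f : Nat) (r : Int)
    (l : List String) (h : pvChain prev pd f r = some l) :
    pvChain (PySem.List.pySetD prev nr v) (PySem.List.pySetD pd nr w) f r = some l := by
  induction f generalizing r l with
  | zero => simp [pvChain] at h
  | succ g ih =>
    rw [pvChain] at h
    rw [pvChain, PySem.List.length_pySetD]
    by_cases h1 : 0 ≤ r ∧ r < (prev.length : Int)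
    · rw [if_pos h1] at h ⊢
      have hrne : r ≠ nr := by
        intro he
        rw [he, hnr] at h
        norm_num at h
        simp at h
      rw [pvGetSet_ne prev nr r v (-1) h0 h1.1 hrne,
        pvGetSet_ne pd nr r w (-1) h0 h1.1 hrne]
      split_ifs at h ⊢
      all_goals try exact h
      rw [Option.map_eq_some_iff] at h ⊢
      obtain ⟨l', hl', rfl⟩ := h
      exact ⟨l', ih _ _ hl', rfl⟩
    · rw [if_neg h1] at h
      exact absurd h (by simp)

theorem pvCnt_set_aux (xs : List Int) (n : Nat) (h : n < xs.length) (hc : xs[n] = -1)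
    (v : Int) (hv : v ≠ -1) :
    (xs.set n v).countP (fun x => x != -1) = xs.countP (fun x => x != -1) + 1 := by
  induction xs generalizing n with
  | nil => simp at h
  | cons a t ih =>
    cases n with
    | zero => simp_all [List.countP_cons]
    | succ m =>
      simp only [List.set_cons_succ, List.countP_cons]
      rw [ih m (by simpa using h) (by simpa using hc)]
      omega

theorem pvCnt_set (prev : List Int) (i v : Int) (h0 : 0 ≤ i) (h1 : i < (prev.length : Int))
    (hcur : PySem.List.pyGetD prev i (-1) = -1) (hv : v ≠ -1) :
    pvCnt (PySem.List.pySetD prev i v) = pvCnt prev + 1 := by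
  have hlt : i.toNat < prev.length := by omega
  rw [PySem.List.pyGetD_of_nonneg _ _ h0, List.getD_eq_getElem?_getD,
    List.getElem?_eq_getElem hlt] at hcur
  simp only [Option.getD_some] at hcur
  unfold pvCnt
  rw [PySem.List.pySetD_of_nonneg _ _ h0]
  exact pvCnt_set_aux prev i.toNat hlt hcur v hv

theorem pvContains_iff (s : PySem.Set Int) (x : Int) :
    PySem.Set.contains s x = true ↔ x ∈ s := by
  simp [PySem.Set.contains]

-- one enqueue attempt of digit d (taken branch) preserves the invariant and the
-- dequeued parent's coherence
theorem pvStep (k : Int) (hk : 2 ≤ k) (prev pd : List Int) (visited : PySem.Set Int)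
    (qA : List Int) (qB : List (Int × String)) (r : Int) (s : String) (nr d : Int)
    (ds : String) (hI : pvInv k prev pd visited qA qB) (hr0 : 0 ≤ r) (hrk : r < k)
    (hrel : pvRel prev pd r s) (hn0 : 0 ≤ nr) (hnk : nr < k)
    (hds : ds = PySem.Int.toStr d) (hd : d ≠ -1)
    (hc : PySem.List.pyGetD prev nr (-1) = -1) :
    pvInv k (PySem.List.pySetD prev nr r) (PySem.List.pySetD pd nr d)
      (PySem.Set.add visited nr) (qA ++ [nr]) (qB ++ [(nr, s ++ ds)]) ∧
    pvRel (PySem.List.pySetD prev nr r) (PySem.List.pySetD pd nr d) r s := by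
  obtain ⟨hlp, hld, hq, hqB, hvis⟩ := hI
  have hkc : ((k.toNat : Int)) = k := Int.toNat_of_nonneg (by omega)
  have hnrlt : nr < (prev.length : Int) := by rw [hlp]; omega
  have hnrltd : nr < (pd.length : Int) := by rw [hld]; omega
  have hcnt : pvCnt (PySem.List.pySetD prev nr r) = pvCnt prev + 1 :=
    pvCnt_set prev nr r hn0 hnrlt hc (by omega)
  -- any coherent entry stays coherent for the updated arrays
  have hpres : ∀ (r' : Int) (s' : String), pvRel prev pd r' s' →
      pvRel (PySem.List.pySetD prev nr r) (PySem.List.pySetD pd nr d) r' s' := by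
    rintro r' s' ⟨l, hch, hs⟩
    refine ⟨l, ?_, hs⟩
    rw [hcnt]
    exact pvChain_mono _ _ _ _ _ (pvChain_set prev pd nr r d hc hn0 _ _ _ hch)
  refine ⟨⟨?_, ?_, ?_, ?_, ?_⟩, hpres r s hrel⟩
  · rw [PySem.List.length_pySetD]; exact hlp
  · rw [PySem.List.length_pySetD]; exact hld
  · simp [hq]
  · intro p hp
    rcases List.mem_append.1 hp with hp | hp
    · obtain ⟨hp0, hpk, hprel⟩ := hqB p hp
      exact ⟨hp0, hpk, hpres _ _ hprel⟩
    · simp only [List.mem_singleton] at hp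
      subst hp
      refine ⟨hn0, hnk, ?_⟩
      obtain ⟨l, hch, hs⟩ := hrel
      refine ⟨ds :: l, ?_, ?_⟩
      · rw [hcnt, pvChain, if_pos ⟨hn0, by rw [PySem.List.length_pySetD]; exact hnrlt⟩]
        rw [pvGetSet_self prev nr r (-1) hn0 hnrlt,
          pvGetSet_self pd nr d (-1) hn0 hnrltd]
        rw [if_neg (by omega), if_neg (by omega)]
        rw [pvChain_set prev pd nr r d hc hn0 _ _ _ hch]
        simp [hds]
      · rw [hs]
        simp only [List.reverse_cons]
        rw [pvJoinSnoc]
  · intro r' h0' hk'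
    by_cases he : r' = nr
    · subst he
      constructor
      · intro _
        rw [pvGetSet_self prev r' r (-1) h0' hnrlt]
        omega
      · intro _
        rw [pvContains_iff]
        rw [PySem.Set.mem_add]
        right; rfl
    · rw [pvGetSet_ne prev nr r' r (-1) hn0 h0' he]
      rw [pvContains_iff, PySem.Set.mem_add, ← pvContains_iff, ← hvis r' h0' hk']
      constructor
      · rintro (h | h)
        · exact (pvContains_iff _ _).2 ((pvContains_iff _ _).1 h) -- placeholder
        · exact absurd h he
      · intro h
        exact Or.inl h

theorem pvGetRep (n : Nat) (i : Int) (h0 : 0 ≤ i) :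
    PySem.List.pyGetD (List.replicate n (-1 : Int)) i (-1) = -1 := by
  rw [PySem.List.pyGetD_of_nonneg _ _ h0, List.getD_eq_getElem?_getD]
  rcases lt_or_ge i.toNat n with h | h
  · simp [h]
  · rw [List.getElem?_eq_none (by simpa using h)]
    simp

theorem pvBfs_eq (k : Int) (hk : 2 ≤ k) : ∀ (f : Nat) (prev pd : List Int)
    (visited : PySem.Set Int) (qA : List Int) (qB : List (Int × String)),
    pvInv k prev pd visited qA qB → pvBfsA k f prev pd qA = pvBfsB k f visited qB := by
  intro f
  induction f with
  | zero => intro prev pd visited qA qB _; rfl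
  | succ g ih =>
    intro prev pd visited qA qB hI
    obtain ⟨hlp, hld, hq, hqB, hvis⟩ := hI
    match hqb : qB with
    | [] =>
      subst hq
      rfl
    | (r, s) :: t =>
      subst hq
      obtain ⟨hr0, hrk, hrel⟩ := hqB (r, s) (by simp)
      rw [pvBfsA.eq_def, pvBfsB.eq_def]
      dsimp only [List.map_cons]
      by_cases hr : r = 0
      · subst hr
        conv_lhs => rw [if_pos (show ((0:Int) == 0) = true by decide)]
        conv_rhs => rw [if_pos (show ((0:Int) == 0) = true by decide)]
        obtain ⟨l, hch, hs⟩ := hrel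
        have hle : pvCnt prev ≤ k.toNat + 1 := by
          have := List.countP_le_length (p := fun x => x != -1) (l := prev)
          unfold pvCnt
          omega
        have hch' := pvChain_le prev pd hle 0 l hch
        rw [pvRecon_of_chain prev pd _ 0 l hch' []]
        simp only [List.nil_append]
        exact ((by simpa using hs : s = PySem.Str.join "" l.reverse)).symm
      · conv_lhs => rw [if_neg (show ¬ (r == 0) = true by simpa using hr)]
        conv_rhs => rw [if_neg (show ¬ (r == 0) = true by simpa using hr)]
        have hkpos : (0 : Int) < k := by omega
        have h10 : 0 ≤ PySem.Int.mod (r * 10) k := PySem.Int.mod_nonneg _ hkpos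
        have h10k : PySem.Int.mod (r * 10) k < k := PySem.Int.mod_lt _ hkpos
        have h20 : 0 ≤ PySem.Int.mod (PySem.Int.mod (r * 10) k + 1) k :=
          PySem.Int.mod_nonneg _ hkpos
        have h2k : PySem.Int.mod (PySem.Int.mod (r * 10) k + 1) k < k :=
          PySem.Int.mod_lt _ hkpos
        have hI' : pvInv k prev pd visited (List.map Prod.fst t) t :=
          ⟨hlp, hld, rfl, fun p hp => hqB p (by simp [hp]), hvis⟩
        -- first digit
        by_cases hc1 : PySem.List.pyGetD prev (PySem.Int.mod (r * 10) k) (-1) = -1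
        · have hnc1 : ¬ PySem.Set.contains visited (PySem.Int.mod (r * 10) k) = true := by
            intro hcontra
            exact ((hvis _ h10 h10k).1 hcontra) hc1
          rw [if_pos (c := (PySem.List.pyGetD prev (PySem.Int.mod (r * 10) k) (-1) == -1) = true)
            (by simpa using hc1)]
          rw [if_neg (c := (PySem.Set.contains visited (PySem.Int.mod (r * 10) k)) = true) hnc1]
          dsimp only
          obtain ⟨hI1, hrel1⟩ := pvStep k hk prev pd visited (List.map Prod.fst t) t r s
            (PySem.Int.mod (r * 10) k) 0 "0" hI' hr0 hrk hrel h10 h10k (by decide)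
            (by decide) hc1
          obtain ⟨hlp1, hld1, hq1, hqB1, hvis1⟩ := hI1
          by_cases hc2 : PySem.List.pyGetD (PySem.List.pySetD prev (PySem.Int.mod (r * 10) k) r)
              (PySem.Int.mod (PySem.Int.mod (r * 10) k + 1) k) (-1) = -1
          · have hnc2 : ¬ PySem.Set.contains (PySem.Set.add visited (PySem.Int.mod (r * 10) k))
                (PySem.Int.mod (PySem.Int.mod (r * 10) k + 1) k) = true := by
              intro hcontra
              exact ((hvis1 _ h20 h2k).1 hcontra) hc2
            rw [if_pos (by simpa using hc2), if_neg hnc2]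
            dsimp only
            obtain ⟨hI2, _⟩ := pvStep k hk _ _ _ _ _ r s
              (PySem.Int.mod (PySem.Int.mod (r * 10) k + 1) k) 1 "1"
              ⟨hlp1, hld1, hq1, hqB1, hvis1⟩ hr0 hrk hrel1 h20 h2k (by decide) (by decide) hc2
            exact ih _ _ _ _ _ hI2
          · have hyc2 : PySem.Set.contains (PySem.Set.add visited (PySem.Int.mod (r * 10) k))
                (PySem.Int.mod (PySem.Int.mod (r * 10) k + 1) k) = true := by
              rw [hvis1 _ h20 h2k]; exact hc2
            rw [if_neg (by simpa using hc2), if_pos hyc2]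
            dsimp only
            exact ih _ _ _ _ _ ⟨hlp1, hld1, hq1, hqB1, hvis1⟩
        · have hyc1 : PySem.Set.contains visited (PySem.Int.mod (r * 10) k) = true := by
            rw [hvis _ h10 h10k]; exact hc1
          rw [if_neg (c := (PySem.List.pyGetD prev (PySem.Int.mod (r * 10) k) (-1) == -1) = true)
            (by simpa using hc1)]
          rw [if_pos (c := (PySem.Set.contains visited (PySem.Int.mod (r * 10) k)) = true) hyc1]
          dsimp only
          by_cases hc2 : PySem.List.pyGetD prev
              (PySem.Int.mod (PySem.Int.mod (r * 10) k + 1) k) (-1) = -1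
          · have hnc2 : ¬ PySem.Set.contains visited
                (PySem.Int.mod (PySem.Int.mod (r * 10) k + 1) k) = true := by
              intro hcontra
              exact ((hvis _ h20 h2k).1 hcontra) hc2
            rw [if_pos (by simpa using hc2), if_neg hnc2]
            dsimp only
            obtain ⟨hI2, _⟩ := pvStep k hk prev pd visited (List.map Prod.fst t) t r s
              (PySem.Int.mod (PySem.Int.mod (r * 10) k + 1) k) 1 "1" hI' hr0 hrk hrel h20 h2k
              (by decide) (by decide) hc2
            exact ih _ _ _ _ _ hI2
          · have hyc2 : PySem.Set.contains visited
                (PySem.Int.mod (PySem.Int.mod (r * 10) k + 1) k) = true := by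
              rw [hvis _ h20 h2k]; exact hc2
            rw [if_neg (by simpa using hc2), if_pos hyc2]
            dsimp only
            exact ih _ _ _ _ _ hI'

theorem smallest_multiple_01_spec : Claim_equal_smallest_multiple_01 := by
  unfold Claim_equal_smallest_multiple_01
  intro k _ hpre
  unfold Pre_smallest_multiple_01 at hpre
  unfold Spec_smallest_multiple_01 smallest_multiple_01 smallest_multiple_01_alt
  by_cases hk1 : k = 1
  · subst hk1
    rfl
  · have hk : 2 ≤ k := by omega
    rw [if_neg (by simpa using hk1), if_neg (by simpa using hk1)]
    have hstart : PySem.Int.mod 1 k = 1 := by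
      rw [PySem.Int.mod_eq_emod_of_pos (by omega)]
      exact Int.emod_eq_of_lt (by norm_num) (by omega)
    rw [hstart]
    have hkc : ((k.toNat : Int)) = k := Int.toNat_of_nonneg (by omega)
    have hlen : (List.replicate k.toNat (-1 : Int)).length = k.toNat := List.length_replicate
    have h1lt : (1 : Int) < ((List.replicate k.toNat (-1 : Int)).length : Int) := by
      rw [hlen]; omega
    apply pvBfs_eq k hk
    refine ⟨?_, ?_, rfl, ?_, ?_⟩
    · rw [PySem.List.length_pySetD, hlen]
    · rw [PySem.List.length_pySetD, hlen]
    · intro p hp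
      simp only [List.mem_singleton] at hp
      subst hp
      refine ⟨by norm_num, by norm_num; omega, ?_⟩
      have hcnt1 : pvCnt (PySem.List.pySetD (List.replicate k.toNat (-1 : Int)) 1 (-2)) = 1 := by
        rw [pvCnt_set (List.replicate k.toNat (-1)) 1 (-2) (by norm_num) h1lt
          (pvGetRep _ _ (by norm_num)) (by norm_num)]
        unfold pvCnt
        rw [List.countP_eq_zero.2 (by intro a ha; simp [List.eq_of_mem_replicate ha])]
      refine ⟨["1"], ?_, by decide⟩
      rw [hcnt1, pvChain, if_pos ⟨by norm_num, by rw [PySem.List.length_pySetD]; exact h1lt⟩]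
      rw [pvGetSet_self _ 1 (-2) (-1) (by norm_num) h1lt,
        pvGetSet_self _ 1 1 (-1) (by norm_num) h1lt]
      norm_num
      decide
    · intro r h0 hkr
      have hofl : PySem.Set.ofList [(1 : Int)] = [(1 : Int)] := by decide
      rw [hofl]
      by_cases he : r = 1
      · subst he
        rw [pvGetSet_self _ 1 (-2) (-1) (by norm_num) h1lt]
        simp
      · rw [pvGetSet_ne _ 1 r (-2) (-1) (by norm_num) h0 he,
          pvGetRep _ _ h0]
        simp [he]
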